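-- pv_equiv track=rewrite | github.com/Sierraki/Solutions | 力扣&Leetcode/算法&algorithm/题库/LCP 22.黑白方格画.py | paintingPlan
-- ===== SOURCE A (Python) =====
-- def paintingPlan(n: int, k: int) -> int:
--     if k == 0:
--         return 1
--     res = []
--     for x in range(0, n + 1):
--         if n - x > 0:
--             y = (k - n * x) // (n - x)
--             if n * x + (n - x) * y == k and y >= 0:
--                 if y != n:
--                     res.append([x, y])
--         if n == x:
--             if n * x == k:
--                 res.append([x, 0])
--     ans = 0
--
--     def fun(n, k):
--         ans1 = ans2 = ans3 = 1
--         tar = max(n, k)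
--         for i in range(1, tar + 1):
--             if i <= n:
--                 ans1 *= i
--             if i <= k:
--                 ans2 *= i
--             if i <= n - k:
--                 ans3 *= i
--         return ans1 // (ans2 * ans3)
--
--     for i, j in res:
--         ans += fun(n, i) * fun(n, j)
--     return ans
-- ===== SOURCE B (Python) =====
-- def comb(n, k):
--     c = 1
--     for t in range(1, k + 1):
--         c = c * (n - k + t) // t
--     return c
--
--
-- def paintingPlan(n: int, k: int) -> int:
--     # A plan with i black rows and j black columns (0 <= i, j < n) covers
--     # i*n + j*n - i*j cells, which is strictly increasing in both i and j,
--     # so a saddleback two-pointer sweep finds every matching pair in O(n).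
--     if k == 0:
--         return 1
--     ans = 0
--     i, j = 0, n - 1
--     while i < n and j >= 0:
--         v = i * n + j * n - i * j
--         if v < k:
--             i += 1
--         elif v > k:
--             j -= 1
--         else:
--             ans += comb(n, i) * comb(n, j)
--             i += 1
--             j -= 1
--     if n > 0 and k == n * n:
--         ans += 1  # the all-black picture
--     return ans
-- ===== Notes on version B (the rewrite author's own statement) =====
-- stated objective: alternative
-- what changed: B finds the matching (row-count, column-count) pairs by a saddleback two-pointer sweep over the coverage function i*n+j*n-i*j (strictly increasing in each coordinate), computing binomials multiplicatively only on hits and adding 1 for the all-black grid when k == n*n; A instead solves the column count per row count in closed form by floor division with an exactness check, collects candidates in a list, and computes each binomial by a factorial-ratio loop to max(n,k).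
import Mathlib
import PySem

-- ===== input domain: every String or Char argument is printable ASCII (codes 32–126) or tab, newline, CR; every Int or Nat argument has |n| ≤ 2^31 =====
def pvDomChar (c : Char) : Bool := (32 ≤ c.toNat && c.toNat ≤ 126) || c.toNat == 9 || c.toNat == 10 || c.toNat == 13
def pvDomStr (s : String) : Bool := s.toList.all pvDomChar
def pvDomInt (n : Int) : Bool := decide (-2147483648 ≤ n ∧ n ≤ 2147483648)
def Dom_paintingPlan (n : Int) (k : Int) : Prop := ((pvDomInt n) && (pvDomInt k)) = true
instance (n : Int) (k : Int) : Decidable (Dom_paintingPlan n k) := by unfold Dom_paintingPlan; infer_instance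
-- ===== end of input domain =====

-- B finds the matching (row, column)-count pairs by a saddleback two-pointer sweep over the
-- coverage function i*n+j*n-i*j (strictly increasing in each coordinate, binomials computed
-- multiplicatively on hits) instead of A's per-row closed-form solve of the column count plus
-- factorial-ratio binomials; objective: alternative (not claimed faster).

-- ===== PORT A =====
-- port of A's inner helper 'fun': three running products over range(1, max(n,k)+1), then floor division
def pvFunA (n : Int) (k : Int) : Int :=
  let tar := max n k
  let s := (PySem.List.pyRange 1 (tar + 1) 1).foldl
    (fun (acc : Int × Int × Int) i =>
      (if i ≤ n then acc.1 * i else acc.1,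
       if i ≤ k then acc.2.1 * i else acc.2.1,
       if i ≤ n - k then acc.2.2 * i else acc.2.2)) (1, 1, 1)
  PySem.Int.floordiv s.1 (s.2.1 * s.2.2)

def paintingPlan (n : Int) (k : Int) : Int :=
  if k = 0 then 1
  else
    let res : List (Int × Int) :=
      (PySem.List.pyRange 0 (n + 1) 1).foldl (fun res x =>
        let res1 :=
          if 0 < n - x then
            let y := PySem.Int.floordiv (k - n * x) (n - x)
            if n * x + (n - x) * y = k ∧ 0 ≤ y then
              (if y ≠ n then res ++ [(x, y)] else res)
            else res
          else res
        if n = x then (if n * x = k then res1 ++ [(x, 0)] else res1) else res1) []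
    res.foldl (fun ans p => ans + pvFunA n p.1 * pvFunA n p.2) 0

-- ===== PORT B =====
-- port of Source B's 'comb': multiplicative running binomial  c = c * (n - k + t) // t
def pvComb (n : Int) (k : Int) : Int :=
  (PySem.List.pyRange 1 (k + 1) 1).foldl
    (fun c t => PySem.Int.floordiv (c * (n - k + t)) t) 1

-- port of Source B's while loop (the local 'v = i*n + j*n - i*j' is inlined at its three uses)
def pvSweep (n : Int) (k : Int) (i : Int) (j : Int) (acc : Int) : Int :=
  if _h : i < n ∧ 0 ≤ j then
    if i * n + j * n - i * j < k then pvSweep n k (i + 1) j acc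
    else if k < i * n + j * n - i * j then pvSweep n k i (j - 1) acc
    else pvSweep n k (i + 1) (j - 1) (acc + pvComb n i * pvComb n j)
  else acc
termination_by (n - i + j + 1).toNat
decreasing_by
  · omega
  · omega
  · omega

def paintingPlan_alt (n : Int) (k : Int) : Int :=
  if k = 0 then 1
  else
    let ans := pvSweep n k 0 (n - 1) 0
    if 0 < n ∧ k = n * n then ans + 1 else ans

-- ===== PRECONDITION & SPEC =====
def Spec_paintingPlan (n : Int) (k : Int) (out : Int) : Prop := out = paintingPlan_alt n k
instance (n : Int) (k : Int) (out : Int) : Decidable (Spec_paintingPlan n k out) := by unfold Spec_paintingPlan; infer_instance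

-- ===== CLAIM (what is proved, stated in full; the proofs are below) =====
def Claim_equal_paintingPlan : Prop := ∀ (n : Int) (k : Int), Dom_paintingPlan n k → Spec_paintingPlan n k (paintingPlan n k)

-- ===== LEMMAS AND PROOFS =====

-- binomial coefficient as an Int
def pvC (n x : Int) : Int := ((n.toNat.choose x.toNat : Nat) : Int)

-- ---------- A side ----------

-- the factorial-like product A's helper accumulates
def pvG (m : Int) (t : Nat) : Int := (((min (max m 0) (t : Int)).toNat.factorial : Nat) : Int)

lemma pvG_succ (m : Int) (t : Nat) :
    pvG m (t + 1) = if (t : Int) + 1 ≤ m then pvG m t * ((t : Int) + 1) else pvG m t := by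
  unfold pvG
  split_ifs with h
  · have e1 : (min (max m 0) ((t : Int) + 1)).toNat = t + 1 := by omega
    have e2 : (min (max m 0) ((t : Int))).toNat = t := by omega
    push_cast
    rw [e1, e2, Nat.factorial_succ]
    push_cast
    ring
  · have e : min (max m 0) ((t : Int) + 1) = min (max m 0) (t : Int) := by omega
    push_cast
    rw [e]

lemma pvFunA_fold (n k : Int) (t : Nat) :
    (PySem.List.pyRange 1 ((t : Int) + 1) 1).foldl
      (fun (acc : Int × Int × Int) i =>
        (if i ≤ n then acc.1 * i else acc.1,
         if i ≤ k then acc.2.1 * i else acc.2.1,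
         if i ≤ n - k then acc.2.2 * i else acc.2.2)) (1, 1, 1)
    = (pvG n t, pvG k t, pvG (n - k) t) := by
  induction t with
  | zero =>
    simp [PySem.List.pyRange_one_eq_nil, pvG]
  | succ t ih =>
    have hsplit : PySem.List.pyRange 1 ((t : Int) + 1 + 1) 1
        = PySem.List.pyRange 1 ((t : Int) + 1) 1 ++ [(t : Int) + 1] :=
      PySem.List.pyRange_one_succ_right (by omega)
    push_cast
    rw [hsplit, List.foldl_append, ih, List.foldl_cons, List.foldl_nil,
      pvG_succ, pvG_succ, pvG_succ]

lemma pvFunA_eq_choose (n j : Int) (hn : 1 ≤ n) (hj : 0 ≤ j) (hjn : j ≤ n) :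
    pvFunA n j = pvC n j := by
  simp only [pvFunA]
  have htar : max n j + 1 = ((n.toNat : Int) + 1) := by omega
  rw [htar, pvFunA_fold n j n.toNat]
  have e1 : (min (max n 0) ((n.toNat : Nat) : Int)).toNat = n.toNat := by omega
  have e2 : (min (max j 0) ((n.toNat : Nat) : Int)).toNat = j.toNat := by omega
  have e3 : (min (max (n - j) 0) ((n.toNat : Nat) : Int)).toNat = n.toNat - j.toNat := by omega
  unfold pvG
  rw [e1, e2, e3]
  have hcast : ((j.toNat.factorial : Nat) : Int) * ((n.toNat - j.toNat).factorial : Int)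
      = (((j.toNat.factorial * (n.toNat - j.toNat).factorial : Nat)) : Int) := by push_cast; ring
  rw [hcast, PySem.Int.floordiv_natCast]
  unfold pvC
  congr 1
  rw [← Nat.choose_eq_factorial_div_factorial (by omega)]

lemma pvFunA_eq_zero (n j : Int) (hn : 1 ≤ n) (hjn : n < j) : pvFunA n j = 0 := by
  simp only [pvFunA]
  have htar : max n j + 1 = ((j.toNat : Int) + 1) := by omega
  rw [htar, pvFunA_fold n j j.toNat]
  have e1 : (min (max n 0) ((j.toNat : Nat) : Int)).toNat = n.toNat := by omega
  have e2 : (min (max j 0) ((j.toNat : Nat) : Int)).toNat = j.toNat := by omega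
  have e3 : (min (max (n - j) 0) ((j.toNat : Nat) : Int)).toNat = 0 := by omega
  unfold pvG
  rw [e1, e2, e3]
  have hcast : ((j.toNat.factorial : Nat) : Int) * ((Nat.factorial 0 : Nat) : Int)
      = ((j.toNat.factorial : Nat) : Int) := by simp [Nat.factorial]
  rw [hcast, PySem.Int.floordiv_natCast]
  have hlt : n.toNat.factorial < j.toNat.factorial :=
    (Nat.factorial_lt (by omega)).mpr (by omega)
  rw [Nat.div_eq_of_lt hlt]
  rfl

-- the list A appends for a given x of its scan
def pvResStep (n k : Int) (x : Int) : List (Int × Int) :=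
  (if 0 < n - x then
     (let y := PySem.Int.floordiv (k - n * x) (n - x)
      if n * x + (n - x) * y = k ∧ 0 ≤ y then (if y ≠ n then [(x, y)] else []) else [])
   else []) ++
  (if n = x then (if n * x = k then [(x, (0 : Int))] else []) else [])

lemma foldA_eq (n k : Int) (l : List Int) (init : List (Int × Int)) :
    l.foldl (fun res x =>
        let res1 :=
          if 0 < n - x then
            let y := PySem.Int.floordiv (k - n * x) (n - x)
            if n * x + (n - x) * y = k ∧ 0 ≤ y then
              (if y ≠ n then res ++ [(x, y)] else res)
            else res
          else res
        if n = x then (if n * x = k then res1 ++ [(x, 0)] else res1) else res1) init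
    = init ++ l.flatMap (pvResStep n k) := by
  induction l generalizing init with
  | nil => simp
  | cons a l ih =>
    rw [List.foldl_cons, ih, List.flatMap_cons, ← List.append_assoc]
    congr 1
    simp only [pvResStep]
    split_ifs <;> simp

lemma foldSum_eq (n : Int) (l : List (Int × Int)) (a : Int) :
    l.foldl (fun ans p => ans + pvFunA n p.1 * pvFunA n p.2) a
    = a + (l.map (fun p => pvFunA n p.1 * pvFunA n p.2)).sum :=
  PySem.List.foldl_add _ _ _

lemma paintingPlan_eq_sum (n k : Int) (hk : ¬ k = 0) :
    paintingPlan n k =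
      ((PySem.List.pyRange 0 (n + 1) 1).map
        (fun x => ((pvResStep n k x).map (fun p => pvFunA n p.1 * pvFunA n p.2)).sum)).sum := by
  unfold paintingPlan
  rw [if_neg hk]
  show ((PySem.List.pyRange 0 (n + 1) 1).foldl (fun res x =>
        let res1 :=
          if 0 < n - x then
            let y := PySem.Int.floordiv (k - n * x) (n - x)
            if n * x + (n - x) * y = k ∧ 0 ≤ y then
              (if y ≠ n then res ++ [(x, y)] else res)
            else res
          else res
        if n = x then (if n * x = k then res1 ++ [(x, 0)] else res1) else res1) []).foldl
      (fun ans p => ans + pvFunA n p.1 * pvFunA n p.2) 0 = _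
  rw [foldA_eq, List.nil_append, foldSum_eq, zero_add]
  induction PySem.List.pyRange 0 (n + 1) 1 with
  | nil => simp
  | cons a l ih => simp [List.flatMap_cons, ih]

-- ---------- B side ----------

lemma pvComb_aux (m : Int) (hm : 0 ≤ m) (t : Nat) :
    (PySem.List.pyRange 1 ((t : Int) + 1) 1).foldl
      (fun c u => PySem.Int.floordiv (c * (m + u)) u) 1
    = (((m + t).toNat.choose t : Nat) : Int) := by
  induction t with
  | zero => simp [PySem.List.pyRange_one_eq_nil]
  | succ t ih =>
    have hsplit : PySem.List.pyRange 1 ((t : Int) + 1 + 1) 1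
        = PySem.List.pyRange 1 ((t : Int) + 1) 1 ++ [(t : Int) + 1] :=
      PySem.List.pyRange_one_succ_right (by omega)
    push_cast
    rw [hsplit, List.foldl_append, ih]
    set M : Nat := (m + t).toNat with hM
    have h1 : m + ((t : Int) + 1) = ((M : Int) + 1) := by omega
    have h2 : (m + ((t : Int) + 1)).toNat = M + 1 := by omega
    rw [List.foldl_cons, List.foldl_nil, h1]
    have h3 : (M.choose t : Int) * ((M : Int) + 1) = (((M + 1).choose (t + 1) * (t + 1) : Nat) : Int) := by
      have := Nat.add_one_mul_choose_eq M t
      push_cast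
      push_cast at this
      nlinarith [this]
    rw [h3]
    have h4 : ((t : Int) + 1) = (((t + 1 : Nat) : Int)) := by push_cast; ring
    rw [h4, PySem.Int.floordiv_natCast]
    rw [Nat.mul_div_cancel _ (by omega)]
    norm_num

lemma pvComb_eq (n i : Int) (hi : 0 ≤ i) (hin : i ≤ n) : pvComb n i = pvC n i := by
  unfold pvComb pvC
  have := pvComb_aux (n - i) (by omega) i.toNat
  rw [show i + 1 = ((i.toNat : Int) + 1) by omega]
  rw [show n - i + ((i.toNat : Nat) : Int) = n - i + i by omega] at this
  rw [show n - i + i = n by ring] at this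
  exact this

-- row sum of B's matching pairs for a fixed x, columns 0..j
def pvRow (n k x j : Int) : Int :=
  ((PySem.List.pyRange 0 (j + 1) 1).map (fun y =>
    if x * n + y * n - x * y = k then pvComb n x * pvComb n y else 0)).sum

-- the part of B's double sum still ahead of the sweep state (i, j)
def pvT (n k i j : Int) : Int :=
  ((PySem.List.pyRange i n 1).map (fun x => pvRow n k x j)).sum

lemma sum_map_zero {α : Type} (l : List α) (g : α → Int) (h : ∀ x ∈ l, g x = 0) :
    (l.map g).sum = 0 := by
  apply List.sum_eq_zero
  intro z hz
  obtain ⟨x, hx, rfl⟩ := List.mem_map.mp hz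
  exact h x hx

lemma pvRow_neg (n k x j : Int) (hj : j < 0) : pvRow n k x j = 0 := by
  unfold pvRow
  rw [PySem.List.pyRange_one_eq_nil (by omega)]
  simp

lemma pvRow_zero (n k x j : Int) (h : ∀ y, 0 ≤ y → y ≤ j → x * n + y * n - x * y ≠ k) :
    pvRow n k x j = 0 := by
  unfold pvRow
  apply sum_map_zero
  intro y hy
  rw [PySem.List.mem_pyRange_one] at hy
  rw [if_neg (h y hy.1 (by omega))]

lemma pvRow_succ (n k x j : Int) (hj : 0 ≤ j) :
    pvRow n k x j = pvRow n k x (j - 1)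
      + (if x * n + j * n - x * j = k then pvComb n x * pvComb n j else 0) := by
  unfold pvRow
  rw [PySem.List.pyRange_one_succ_right hj, List.map_append, List.sum_append,
    show j - 1 + 1 = j by ring]
  simp

lemma pvT_nil (n k i j : Int) (hi : n ≤ i) : pvT n k i j = 0 := by
  unfold pvT
  rw [PySem.List.pyRange_one_eq_nil hi]
  simp

lemma pvT_cons (n k i j : Int) (hi : i < n) :
    pvT n k i j = pvRow n k i j + pvT n k (i + 1) j := by
  unfold pvT
  rw [PySem.List.pyRange_one_cons hi, List.map_cons, List.sum_cons]

lemma pvT_drop_col (n k i j : Int) (hj0 : 0 ≤ j)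
    (h : ∀ x, i ≤ x → x < n → x * n + j * n - x * j ≠ k) :
    pvT n k i j = pvT n k i (j - 1) := by
  unfold pvT
  apply congrArg List.sum
  apply List.map_congr_left
  intro x hx
  rw [PySem.List.mem_pyRange_one] at hx
  rw [pvRow_succ n k x j hj0, if_neg (h x hx.1 hx.2), add_zero]

-- the saddleback invariant: the sweep from state (i, j) adds exactly the remaining double sum
lemma sweep_eq (n k : Int) (m : Nat) :
    ∀ i j acc, (n - i + j + 1).toNat ≤ m → 0 ≤ i → j ≤ n - 1 →
      pvSweep n k i j acc = acc + pvT n k i j := by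
  induction m with
  | zero =>
    intro i j acc hm hi hj
    have hcond : ¬ (i < n ∧ 0 ≤ j) := by omega
    rw [pvSweep, dif_neg hcond]
    by_cases hin : n ≤ i
    · rw [pvT_nil n k i j hin]; ring
    · have hjneg : j < 0 := by omega
      unfold pvT
      rw [sum_map_zero _ _ (fun x _ => pvRow_neg n k x j hjneg)]
      ring
  | succ m ih =>
    intro i j acc hm hi hj
    by_cases hcond : i < n ∧ 0 ≤ j
    · rw [pvSweep, dif_pos hcond]
      by_cases hv1 : i * n + j * n - i * j < k
      · rw [if_pos hv1, ih (i + 1) j acc (by omega) (by omega) hj]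
        rw [pvT_cons n k i j hcond.1]
        rw [pvRow_zero n k i j (by
          intro y hy0 hyj heq
          have hprod : 0 ≤ (j - y) * (n - i) := mul_nonneg (by omega) (by omega)
          have hring : i * n + j * n - i * j - (i * n + y * n - i * y) = (j - y) * (n - i) := by
            ring
          omega)]
        ring
      · rw [if_neg hv1]
        by_cases hv2 : k < i * n + j * n - i * j
        · rw [if_pos hv2, ih i (j - 1) acc (by omega) hi (by omega)]
          rw [pvT_drop_col n k i j hcond.2 (by
            intro x hxi hxn heq
            have hprod : 0 ≤ (x - i) * (n - j) := mul_nonneg (by omega) (by omega)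
            have hring : x * n + j * n - x * j - (i * n + j * n - i * j) = (x - i) * (n - j) := by
              ring
            omega)]
        · rw [if_neg hv2]
          have hveq : i * n + j * n - i * j = k := by omega
          rw [ih (i + 1) (j - 1) _ (by omega) (by omega) (by omega)]
          rw [pvT_cons n k i j hcond.1]
          rw [pvRow_succ n k i j hcond.2, if_pos hveq]
          rw [pvRow_zero n k i (j - 1) (by
            intro y hy0 hyj heq
            have hprod : 1 * 1 ≤ (j - y) * (n - i) :=
              mul_le_mul (by omega) (by omega) (by omega) (by omega)
            have hring : i * n + j * n - i * j - (i * n + y * n - i * y) = (j - y) * (n - i) := by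
              ring
            omega)]
          rw [pvT_drop_col n k (i + 1) j hcond.2 (by
            intro x hxi hxn heq
            have hprod : 1 * 1 ≤ (x - i) * (n - j) :=
              mul_le_mul (by omega) (by omega) (by omega) (by omega)
            have hring : x * n + j * n - x * j - (i * n + j * n - i * j) = (x - i) * (n - j) := by
              ring
            omega)]
          ring
    · rw [pvSweep, dif_neg hcond]
      by_cases hin : n ≤ i
      · rw [pvT_nil n k i j hin]; ring
      · have hjneg : j < 0 := by omega
        unfold pvT
        rw [sum_map_zero _ _ (fun x _ => pvRow_neg n k x j hjneg)]
        ring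

lemma sum_map_delta (l : List Int) (hl : l.Nodup) (y : Int) (v : Int → Int) :
    (l.map (fun j => if j = y then v j else 0)).sum = if y ∈ l then v y else 0 := by
  induction l with
  | nil => simp
  | cons a t ih =>
    rw [List.nodup_cons] at hl
    rw [List.map_cons, List.sum_cons, ih hl.2]
    by_cases hay : a = y
    · subst hay
      have hnt : a ∉ t := hl.1
      simp [hnt]
    · simp [hay, List.mem_cons, Ne.symm]

-- B's row sum for a fixed x < n equals A's contribution for that x
lemma inner_eq (n k x : Int) (hx0 : 0 ≤ x) (hxn : x < n) :
    ((PySem.List.pyRange 0 n 1).map (fun y =>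
        if x * n + y * n - x * y = k then pvComb n x * pvComb n y else 0)).sum
    = ((pvResStep n k x).map (fun p => pvFunA n p.1 * pvFunA n p.2)).sum := by
  have hn1 : 1 ≤ n := by omega
  have hd : 0 < n - x := by omega
  set y0 := PySem.Int.floordiv (k - n * x) (n - x) with hy0
  have hcond_lin : ∀ j : Int, x * n + j * n - x * j = k ↔ (n - x) * j = k - n * x := by
    intro j; constructor <;> intro h <;> linarith
  simp only [pvResStep, if_pos hd, if_neg (show ¬ n = x by omega), List.append_nil]
  by_cases hexact : n * x + (n - x) * y0 = k
  · -- the equation has the unique solution y = y0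
    have hcond : ∀ j : Int, (x * n + j * n - x * j = k) ↔ j = y0 := by
      intro j
      rw [hcond_lin]
      constructor
      · intro h
        have h2 : (n - x) * j = (n - x) * y0 := by linarith
        exact mul_left_cancel₀ (by omega) h2
      · rintro rfl; linarith
    have hfun : (fun j : Int =>
        if x * n + j * n - x * j = k then pvComb n x * pvComb n j else 0)
        = (fun j : Int => if j = y0 then pvComb n x * pvComb n j else 0) := by
      funext j
      by_cases hj : j = y0
      · rw [if_pos ((hcond j).mpr hj), if_pos hj]
      · rw [if_neg (fun h => hj ((hcond j).mp h)), if_neg hj]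
    rw [hfun, sum_map_delta _ (PySem.List.nodup_pyRange_one 0 n) y0 _]
    have hmem_iff : y0 ∈ PySem.List.pyRange 0 n ↔ 0 ≤ y0 ∧ y0 < n := PySem.List.mem_pyRange_one
    by_cases hy0n : 0 ≤ y0 ∧ y0 < n
    · rw [if_pos (hmem_iff.mpr hy0n),
        if_pos (show n * x + (n - x) * y0 = k ∧ 0 ≤ y0 from ⟨hexact, hy0n.1⟩),
        if_pos (show y0 ≠ n by omega)]
      rw [List.map_cons, List.map_nil, List.sum_cons, List.sum_nil, add_zero]
      rw [pvComb_eq n x hx0 (by omega), pvComb_eq n y0 hy0n.1 (by omega),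
        pvFunA_eq_choose n x hn1 hx0 (by omega), pvFunA_eq_choose n y0 hn1 hy0n.1 (by omega)]
    · rw [if_neg (fun h => hy0n (hmem_iff.mp h))]
      by_cases hyneg : 0 ≤ y0
      · -- y0 ≥ n
        have hyn : n ≤ y0 := by omega
        rw [if_pos (show n * x + (n - x) * y0 = k ∧ 0 ≤ y0 from ⟨hexact, hyneg⟩)]
        by_cases hyeq : y0 = n
        · rw [if_neg (by simpa using hyeq)]
          simp
        · rw [if_pos hyeq]
          rw [List.map_cons, List.map_nil, List.sum_cons, List.sum_nil, add_zero]
          rw [pvFunA_eq_zero n y0 hn1 (by omega), mul_zero]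
      · rw [if_neg (fun h => hyneg h.2)]
        simp
  · -- no y satisfies the equation
    have hzero : ∀ z ∈ (PySem.List.pyRange 0 n 1).map (fun y =>
        if x * n + y * n - x * y = k then pvComb n x * pvComb n y else 0), z = 0 := by
      intro z hz
      rw [List.mem_map] at hz
      obtain ⟨j, _, hj⟩ := hz
      rw [← hj]
      rw [if_neg]
      intro h
      rw [hcond_lin] at h
      have hyj : y0 = j := by
        rw [hy0, ← h, PySem.Int.floordiv_eq_ediv_of_pos hd]
        exact Int.mul_ediv_cancel_left j (by omega)
      exact hexact (by rw [hyj]; linarith)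
    rw [List.sum_eq_zero hzero]
    rw [if_neg (fun h => hexact h.1)]
    simp

-- B as an explicit double sum plus the all-black-grid term
lemma alt_eq_sum (n k : Int) (hk : ¬ k = 0) :
    paintingPlan_alt n k =
      ((PySem.List.pyRange 0 n 1).map (fun x =>
        ((PySem.List.pyRange 0 n 1).map (fun y =>
          if x * n + y * n - x * y = k then pvComb n x * pvComb n y else 0)).sum)).sum
      + (if 0 < n ∧ k = n * n then 1 else 0) := by
  unfold paintingPlan_alt
  rw [if_neg hk]
  have hsweep : pvSweep n k 0 (n - 1) 0 = pvT n k 0 (n - 1) := by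
    have := sweep_eq n k (n - 0 + (n - 1) + 1).toNat 0 (n - 1) 0 (le_refl _) (le_refl 0)
      (by omega)
    rw [this, zero_add]
  have hT : pvT n k 0 (n - 1)
      = ((PySem.List.pyRange 0 n 1).map (fun x =>
        ((PySem.List.pyRange 0 n 1).map (fun y =>
          if x * n + y * n - x * y = k then pvComb n x * pvComb n y else 0)).sum)).sum := by
    unfold pvT pvRow
    rw [show n - 1 + 1 = n by ring]
  show (if 0 < n ∧ k = n * n then pvSweep n k 0 (n - 1) 0 + 1 else pvSweep n k 0 (n - 1) 0) = _
  rw [hsweep, hT]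
  split_ifs <;> simp

-- ===== VERDICT (by name: the statement is the Claim_ definition above) =====
theorem paintingPlan_spec : Claim_equal_paintingPlan := by
  intro n k _
  unfold Spec_paintingPlan
  by_cases hk : k = 0
  · simp [paintingPlan, paintingPlan_alt, hk]
  rw [paintingPlan_eq_sum n k hk, alt_eq_sum n k hk]
  by_cases hn : 0 ≤ n
  · rw [PySem.List.pyRange_one_succ_right hn, List.map_append, List.sum_append]
    congr 1
    · apply congrArg List.sum
      apply List.map_congr_left
      intro x hx
      rw [PySem.List.mem_pyRange_one] at hx
      exact (inner_eq n k x hx.1 hx.2).symm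
    · simp only [List.map_cons, List.map_nil, List.sum_cons, List.sum_nil, add_zero]
      simp only [pvResStep, if_neg (show ¬ 0 < n - n by omega), List.nil_append]
      by_cases hkn : n * n = k
      · have hn0 : n ≠ 0 := by rintro rfl; exact hk hkn.symm
        have hn1 : 1 ≤ n := by omega
        rw [if_pos hkn, if_pos (show 0 < n ∧ k = n * n from ⟨by omega, hkn.symm⟩)]
        simp only [if_true, List.map_cons, List.map_nil, List.sum_cons, List.sum_nil, add_zero]
        rw [pvFunA_eq_choose n n hn1 (by omega) le_rfl, pvFunA_eq_choose n 0 hn1 le_rfl hn]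
        simp [pvC, Nat.choose_self, Nat.choose_zero_right]
      · rw [if_neg hkn,
          if_neg (show ¬ (0 < n ∧ k = n * n) by rintro ⟨_, h2⟩; exact hkn h2.symm)]
        simp
  · rw [PySem.List.pyRange_one_eq_nil (show n + 1 ≤ 0 by omega),
      PySem.List.pyRange_one_eq_nil (show n ≤ 0 by omega),
      if_neg (show ¬ (0 < n ∧ k = n * n) by rintro ⟨h1, _⟩; omega)]
    simp
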